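-- pv_equiv track=rewrite | github.com/tejaslakshmangith/ibaby | ai_engine/meal_planner.py | _is_strictly_vegetarian
-- ===== SOURCE A (Python) =====
-- from typing import Dict, List, Optional
--
-- def _is_strictly_vegetarian(meal: Dict) -> bool:
--     """
--     Check if a meal is strictly vegetarian (no meat/fish/chicken/egg).
--
--     Args:
--         meal: The meal to check
--
--     Returns:
--         bool: True if vegetarian, False otherwise
--     """
--     # Keywords that indicate non-vegetarian
--     non_veg_keywords = [
--         'chicken', 'fish', 'meat', 'egg', 'mutton', 'lamb', 'pork', 'beef',
--         'seafood', 'prawn', 'shrimp', 'crab', 'lobster', 'turkey', 'duck',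
--         'murgh', 'machli', 'gosht', 'anda', 'keema', 'tandoori chicken'
--     ]
--
--     # Check all text fields in the meal
--     for key, value in meal.items():
--         if isinstance(value, str):
--             value_lower = value.lower()
--             if any(keyword in value_lower for keyword in non_veg_keywords):
--                 return False
--
--     return True
-- ===== SOURCE B (Python) =====
-- def _is_strictly_vegetarian(meal):
--     """
--     Check if a meal is strictly vegetarian (no meat/fish/chicken/egg).
--     B: gather every string field (lowercased) into one newline-joined text,
--     then run a single membership pass over the keyword list.
--     """
--     non_veg_keywords = [
--         'chicken', 'fish', 'meat', 'egg', 'mutton', 'lamb', 'pork', 'beef',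
--         'seafood', 'prawn', 'shrimp', 'crab', 'lobster', 'turkey', 'duck',
--         'murgh', 'machli', 'gosht', 'anda', 'keema', 'tandoori chicken'
--     ]
--     combined = "\n".join(v.lower() for v in meal.values() if isinstance(v, str))
--     return not any(kw in combined for kw in non_veg_keywords)
-- ===== Notes on version B (the rewrite author's own statement) =====
-- stated objective: alternative
-- what changed: A scans the keyword list once per field with an early return; B first builds a single newline-joined lowercased text of all string fields and then makes one membership pass over the keyword list (newline is a safe separator since no keyword contains it).
import Mathlib
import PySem

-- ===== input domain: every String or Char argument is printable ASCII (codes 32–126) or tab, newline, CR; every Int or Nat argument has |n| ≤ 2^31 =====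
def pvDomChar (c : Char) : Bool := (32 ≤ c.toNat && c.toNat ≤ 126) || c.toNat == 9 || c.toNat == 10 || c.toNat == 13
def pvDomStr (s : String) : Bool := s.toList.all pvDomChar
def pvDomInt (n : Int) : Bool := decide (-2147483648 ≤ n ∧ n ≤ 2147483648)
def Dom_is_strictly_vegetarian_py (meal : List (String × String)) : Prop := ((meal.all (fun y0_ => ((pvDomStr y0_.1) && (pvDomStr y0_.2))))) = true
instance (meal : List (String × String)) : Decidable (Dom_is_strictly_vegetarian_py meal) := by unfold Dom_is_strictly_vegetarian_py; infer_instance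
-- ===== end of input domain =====

-- B builds one newline-joined lowercased text of all fields and scans the keyword list once,
-- instead of A's per-field loop with an early return (alternative decomposition, same cost).


-- ===== PORT A =====
def nonVegKeywordsA : List String :=
  ["chicken", "fish", "meat", "egg", "mutton", "lamb", "pork", "beef",
   "seafood", "prawn", "shrimp", "crab", "lobster", "turkey", "duck",
   "murgh", "machli", "gosht", "anda", "keema", "tandoori chicken"]

-- the 'for key, value in meal.items(): … return False' loop, with its early return
-- (values are typed str here, so A's isinstance(value, str) check is always true)
def vegLoopA : List (String × String) → Bool
  | [] => true
  | (_, v) :: rest =>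
      let value_lower := PySem.Str.lower v
      if nonVegKeywordsA.any (fun keyword => PySem.Str.isIn keyword value_lower) then false
      else vegLoopA rest

def is_strictly_vegetarian_py (meal : List (String × String)) : Bool :=
  vegLoopA meal

-- ===== PORT B =====
def nonVegKeywordsB : List String :=
  ["chicken", "fish", "meat", "egg", "mutton", "lamb", "pork", "beef",
   "seafood", "prawn", "shrimp", "crab", "lobster", "turkey", "duck",
   "murgh", "machli", "gosht", "anda", "keema", "tandoori chicken"]

def is_strictly_vegetarian_py_alt (meal : List (String × String)) : Bool :=
  let combined := PySem.Str.join "\n" (meal.map (fun kv => PySem.Str.lower kv.2))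
  !(nonVegKeywordsB.any (fun kw => PySem.Str.isIn kw combined))

-- ===== PRECONDITION & SPEC =====
def Spec_is_strictly_vegetarian_py (meal : List (String × String)) (out : Bool) : Prop := out = is_strictly_vegetarian_py_alt meal
instance (meal : List (String × String)) (out : Bool) : Decidable (Spec_is_strictly_vegetarian_py meal out) := by unfold Spec_is_strictly_vegetarian_py; infer_instance

-- ===== CLAIM (what is proved, stated in full; the proofs are below) =====
def Claim_equal_is_strictly_vegetarian_py : Prop := ∀ (meal : List (String × String)), Dom_is_strictly_vegetarian_py meal → Spec_is_strictly_vegetarian_py meal (is_strictly_vegetarian_py meal)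

-- ===== LEMMAS AND PROOFS =====

-- A's loop is 'all fields clean' (the early return does not change the value)
lemma vegLoopA_eq_all (meal : List (String × String)) :
    vegLoopA meal
      = meal.all (fun kv => !(nonVegKeywordsA.any (fun kw => PySem.Str.isIn kw (PySem.Str.lower kv.2)))) := by
  induction meal with
  | nil => rfl
  | cons kv rest ih =>
      obtain ⟨k, v⟩ := kv
      simp only [vegLoopA, List.all_cons, ih]
      cases hany : nonVegKeywordsA.any (fun keyword => PySem.Str.isIn keyword (PySem.Str.lower v)) <;>
        simp

-- a pattern with no 'c' is a substring of a ++ c :: b iff it is a substring of a or of b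
lemma isIn_append_cons (kw a b : List Char) (c : Char) (hc : c ∉ kw) :
    PySem.Chars.isIn kw (a ++ c :: b) = true ↔
      (PySem.Chars.isIn kw a = true ∨ PySem.Chars.isIn kw b = true) := by
  constructor
  · intro h
    obtain ⟨j, hp⟩ := (PySem.Chars.exists_prefix_drop_iff_isIn kw (a ++ c :: b)).mpr h
    by_cases hj : j ≤ a.length
    · rw [List.drop_append_of_le_length hj] at hp
      by_cases hlen : kw.length ≤ (a.drop j).length
      · exact Or.inl ((PySem.Chars.exists_prefix_drop_iff_isIn kw a).mp
          ⟨j, (List.isPrefix_append_of_length hlen).mp hp⟩)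
      · exfalso
        obtain ⟨t, ht⟩ := hp
        have hm : (a.drop j).length < kw.length := by omega
        have h1 : (kw ++ t)[(a.drop j).length]? = kw[(a.drop j).length]? :=
          List.getElem?_append_left hm
        have h2 : (a.drop j ++ c :: b)[(a.drop j).length]? = some c := by simp
        rw [ht, h2] at h1
        have hkc : kw[(a.drop j).length]'hm = c := by
          obtain ⟨_, he⟩ := List.getElem?_eq_some_iff.mp h1.symm
          exact he
        exact hc (hkc ▸ List.getElem_mem hm)
    · refine Or.inr ((PySem.Chars.exists_prefix_drop_iff_isIn kw b).mp ⟨j - a.length - 1, ?_⟩)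
      have hj' : j = (a ++ [c]).length + (j - a.length - 1) := by simp; omega
      have hsplit : (a ++ c :: b) = (a ++ [c]) ++ b := by simp
      rw [hsplit, hj', List.drop_length_add_append] at hp
      exact hp
  · rintro (h | h)
    · obtain ⟨j, hp⟩ := (PySem.Chars.exists_prefix_drop_iff_isIn kw a).mpr h
      have hp' : kw <+: a.drop (min j a.length) := by
        by_cases hj : j ≤ a.length
        · rwa [Nat.min_eq_left hj]
        · rw [Nat.min_eq_right (by omega), List.drop_length]
          rw [List.drop_eq_nil_of_le (by omega)] at hp
          exact hp
      refine (PySem.Chars.exists_prefix_drop_iff_isIn kw (a ++ c :: b)).mp ⟨min j a.length, ?_⟩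
      rw [List.drop_append_of_le_length (Nat.min_le_right _ _)]
      exact List.prefix_append_of_prefix hp'
    · obtain ⟨j, hp⟩ := (PySem.Chars.exists_prefix_drop_iff_isIn kw b).mpr h
      refine (PySem.Chars.exists_prefix_drop_iff_isIn kw (a ++ c :: b)).mp ⟨(a ++ [c]).length + j, ?_⟩
      have hsplit : (a ++ c :: b) = (a ++ [c]) ++ b := by simp
      rw [hsplit, List.drop_length_add_append]
      exact hp

-- substring of a '\n'-joined text = substring of one of the parts (for newline-free nonempty patterns)
lemma isIn_join_newline (kw : List Char) (hne : kw ≠ []) (hnl : '\n' ∉ kw)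
    (parts : List (List Char)) :
    PySem.Chars.isIn kw (PySem.Chars.join ['\n'] parts) = true ↔
      ∃ p ∈ parts, PySem.Chars.isIn kw p = true := by
  induction parts with
  | nil =>
      rw [PySem.Chars.join_nil]
      simp only [List.not_mem_nil, false_and, exists_false, iff_false]
      intro h
      obtain ⟨j, hp⟩ := (PySem.Chars.exists_prefix_drop_iff_isIn kw []).mpr h
      exact hne (List.prefix_nil.mp (by simpa using hp))
  | cons p ps ih =>
      cases ps with
      | nil => rw [PySem.Chars.join_singleton]; simp
      | cons q rest =>
          rw [PySem.Chars.join_cons_cons]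
          have hcons : p ++ ['\n'] ++ PySem.Chars.join ['\n'] (q :: rest)
               = p ++ '\n' :: PySem.Chars.join ['\n'] (q :: rest) := by simp
          rw [hcons, isIn_append_cons kw _ _ _ hnl, ih]
          simp

-- every keyword is nonempty and newline-free (so '\n' is a safe join separator)
lemma kwA_ok : ∀ kw ∈ nonVegKeywordsA, kw.toList ≠ [] ∧ '\n' ∉ kw.toList := by decide

-- ===== VERDICT (by name: the statement is the Claim_ definition above) =====
theorem is_strictly_vegetarian_py_spec : Claim_equal_is_strictly_vegetarian_py := by
  intro meal _
  unfold Spec_is_strictly_vegetarian_py is_strictly_vegetarian_py is_strictly_vegetarian_py_alt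
  rw [vegLoopA_eq_all]
  show _ = !(nonVegKeywordsB.any (fun kw => PySem.Str.isIn kw
      (PySem.Str.join "\n" (meal.map (fun kv => PySem.Str.lower kv.2)))))
  have hBA : nonVegKeywordsB = nonVegKeywordsA := rfl
  rw [hBA, Bool.eq_iff_iff]
  simp only [List.all_eq_true, Bool.not_eq_true', List.any_eq_false,
    PySem.Str.isIn_eq, PySem.Str.toList_join, PySem.Str.toList_lower, List.map_map]
  have hsep : ("\n" : String).toList = ['\n'] := rfl
  have hmap : (meal.map (String.toList ∘ fun kv => PySem.Str.lower kv.2))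
            = meal.map (fun kv => PySem.Chars.lower kv.2.toList) := by
    apply List.map_congr_left; intro kv _; simp [PySem.Str.toList_lower]
  rw [hsep, hmap]
  constructor
  · intro h kw hkw
    rw [Bool.not_eq_true, ← Bool.not_eq_true]
    intro hIn
    obtain ⟨p, hp, hInP⟩ := (isIn_join_newline kw.toList (kwA_ok kw hkw).1 (kwA_ok kw hkw).2 _).mp hIn
    obtain ⟨kv, hkv, rfl⟩ := List.mem_map.mp hp
    exact absurd hInP (by simpa using h kv hkv kw hkw)
  · intro h kv hkv kw hkw hIn
    have hAll : PySem.Chars.isIn kw.toList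
        (PySem.Chars.join ['\n'] (meal.map (fun kv => PySem.Chars.lower kv.2.toList))) = true :=
      (isIn_join_newline kw.toList (kwA_ok kw hkw).1 (kwA_ok kw hkw).2 _).mpr
        ⟨_, List.mem_map.mpr ⟨kv, hkv, rfl⟩, hIn⟩
    exact absurd hAll (by simpa using h kw hkw)
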